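-- pv_equiv track=rewrite | github.com/RockJohnson503/MyDemo | PyDemo/algorithm/lintPractice.py | median_helper
-- ===== SOURCE A (Python) =====
-- def median_helper(nums, low, mid, height):
--     if low <= height:
--         pivot = partition2(nums, low, height)
--         if pivot == mid:
--             return nums[mid]
--         elif pivot < mid:
--             return median_helper(nums, pivot + 1, mid, height)
--         else:
--             return median_helper(nums, low, mid, pivot - 1)
--
-- def partition2(nums, low, height):
--     mid = (low + height) // 2
--     nums[mid], nums[height] = nums[height], nums[mid]
--     boundary = low
--     for index in range(low, height):
--         if nums[index] < nums[height]:
--             nums[index], nums[boundary] = nums[boundary], nums[index]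
--             boundary += 1
--     nums[height], nums[boundary] = nums[boundary], nums[height]
--     return boundary
-- ===== SOURCE B (Python) =====
-- def median_helper(nums, low, mid, height):
--     # Select the element that quickselect would leave at position `mid` of the
--     # window nums[low:height+1]: the (mid - low)-th smallest of that window.
--     # (Return-value equivalent to A; does not mutate nums.)
--     if low <= mid <= height:
--         return sorted(nums[low:height + 1])[mid - low]
--     return None
-- ===== Notes on version B (the rewrite author's own statement) =====
-- stated objective: simpler
-- what changed: Replaces the recursive in-place quickselect (partition2 plus window-narrowing recursion) by a direct selection: sort a copy of the window and index it; B does not mutate nums, so the equivalence is about return values only.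
-- outside the precondition, e.g. on median_helper([-3, -1, -3, 1], -1, 0, 1): A returns -1, B raises IndexError; on median_helper([5], -1, 0, -1): A returns None, B returns None
import Mathlib
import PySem

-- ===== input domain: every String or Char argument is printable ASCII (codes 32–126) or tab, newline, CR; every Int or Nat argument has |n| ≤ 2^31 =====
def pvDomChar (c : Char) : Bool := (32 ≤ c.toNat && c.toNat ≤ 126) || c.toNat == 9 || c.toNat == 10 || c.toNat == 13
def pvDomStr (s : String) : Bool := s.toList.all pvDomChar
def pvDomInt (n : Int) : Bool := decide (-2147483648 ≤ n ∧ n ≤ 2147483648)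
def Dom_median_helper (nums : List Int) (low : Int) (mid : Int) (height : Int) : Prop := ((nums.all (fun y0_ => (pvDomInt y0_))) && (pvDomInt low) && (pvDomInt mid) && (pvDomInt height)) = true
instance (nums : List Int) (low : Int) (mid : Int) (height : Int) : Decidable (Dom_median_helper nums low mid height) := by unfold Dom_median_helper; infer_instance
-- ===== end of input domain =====

-- B replaces A's recursive in-place quickselect by sort-the-window-and-index (objective: simpler).
-- A mutates nums in place; B does not: the equivalence proved here is about the RETURN value only.

-- ===== PORT A =====
-- `nums[i], nums[j] = nums[j], nums[i]` (exact for in-range indices; Pre_ keeps all indices in range)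
def pySwap (xs : List Int) (i j : Int) : List Int :=
  let vi := PySem.List.pyGetD xs i 0
  let vj := PySem.List.pyGetD xs j 0
  PySem.List.pySetD (PySem.List.pySetD xs i vj) j vi

-- the body of partition2's `for index in range(low, height)` loop; state = (nums, boundary)
def pstep (height : Int) (st : List Int × Int) (index : Int) : List Int × Int :=
  if PySem.List.pyGetD st.1 index 0 < PySem.List.pyGetD st.1 height 0 then
    (pySwap st.1 index st.2, st.2 + 1)
  else st

def partition2 (nums : List Int) (low : Int) (height : Int) : List Int × Int :=
  let mid := PySem.Int.floordiv (low + height) 2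
  let nums1 := pySwap nums mid height
  let st := (PySem.List.pyRange low height 1).foldl (pstep height) (nums1, low)
  let nums2 := pySwap st.1 height st.2
  (nums2, st.2)

-- boundary starts at low and gains at most 1 per loop iteration (pure arithmetic; used for termination)
theorem pstep_fold_snd_bounds (height : Int) (l : List Int) (xs : List Int) (b : Int) :
    b ≤ (l.foldl (pstep height) (xs, b)).2 ∧
    (l.foldl (pstep height) (xs, b)).2 ≤ b + l.length := by
  induction l generalizing xs b with
  | nil => simp
  | cons x t ih =>
    simp only [List.foldl_cons, List.length_cons]
    have hstep : pstep height (xs, b) x =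
        if PySem.List.pyGetD xs x 0 < PySem.List.pyGetD xs height 0 then
          (pySwap xs x b, b + 1) else (xs, b) := rfl
    rw [hstep]
    split_ifs
    · have := ih (pySwap xs x b) (b + 1); push_cast; push_cast at this; omega
    · have := ih xs b; push_cast; push_cast at this; omega

theorem partition2_snd_bounds (nums : List Int) (low height : Int) (h : low ≤ height) :
    low ≤ (partition2 nums low height).2 ∧ (partition2 nums low height).2 ≤ height := by
  unfold partition2
  have := pstep_fold_snd_bounds height (PySem.List.pyRange low height 1)
    (pySwap nums (PySem.Int.floordiv (low + height) 2) height) low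
  rw [PySem.List.length_pyRange_one] at this
  simp only []
  omega

def median_helper (nums : List Int) (low : Int) (mid : Int) (height : Int) : Option Int :=
  if h : low ≤ height then
    let r := partition2 nums low height
    if r.2 = mid then PySem.List.pyGet? r.1 mid
    else if r.2 < mid then median_helper r.1 (r.2 + 1) mid height
    else median_helper r.1 low mid (r.2 - 1)
  else none
termination_by (height - low + 1).toNat
decreasing_by
  · have := partition2_snd_bounds nums low height h; omega
  · have := partition2_snd_bounds nums low height h; omega

-- ===== PORT B =====
def median_helper_alt (nums : List Int) (low : Int) (mid : Int) (height : Int) : Option Int :=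
  if low ≤ mid ∧ mid ≤ height then
    PySem.List.pyGet?
      (PySem.List.sorted (PySem.List.slice nums (some low) (some (height + 1))) (fun x => x) false)
      (mid - low)
  else none

-- ===== PRECONDITION & SPEC =====
-- Pre_ excludes nonempty windows (low ≤ height) whose bounds are not in-range indices of nums:
-- there A raises IndexError or returns only via Python's negative-index wraparound.
def Pre_median_helper (nums : List Int) (low : Int) (mid : Int) (height : Int) : Prop :=
  height < low ∨ (0 ≤ low ∧ low ≤ height ∧ height < (nums.length : Int))
instance (nums : List Int) (low : Int) (mid : Int) (height : Int) : Decidable (Pre_median_helper nums low mid height) := by unfold Pre_median_helper; infer_instance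
def pvWitness_median_helper : List Int × Int × Int × Int := ([3, 1, 2], 0, 1, 2)

def Spec_median_helper (nums : List Int) (low : Int) (mid : Int) (height : Int) (out : Option Int) : Prop := out = median_helper_alt nums low mid height
instance (nums : List Int) (low : Int) (mid : Int) (height : Int) (out : Option Int) : Decidable (Spec_median_helper nums low mid height out) := by unfold Spec_median_helper; infer_instance

-- ===== CLAIM (what is proved, stated in full; the proofs are below) =====
def Claim_equal_median_helper : Prop := ∀ (nums : List Int) (low : Int) (mid : Int) (height : Int), Dom_median_helper nums low mid height → Pre_median_helper nums low mid height → Spec_median_helper nums low mid height (median_helper nums low mid height)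

-- ===== LEMMAS AND PROOFS =====

-- ---- facts about pySwap (all indices in range) ----

theorem length_pySwap (xs : List Int) (i j : Int) : (pySwap xs i j).length = xs.length := by
  simp [pySwap, PySem.List.length_pySetD]

theorem get_pySwap (xs : List Int) (i j k : Int)
    (hi0 : 0 ≤ i) (hi : i < (xs.length : Int)) (hj0 : 0 ≤ j) (hj : j < (xs.length : Int))
    (hk0 : 0 ≤ k) (hk : k < (xs.length : Int)) :
    PySem.List.pyGetD (pySwap xs i j) k 0 =
      if k = j then PySem.List.pyGetD xs i 0
      else if k = i then PySem.List.pyGetD xs j 0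
      else PySem.List.pyGetD xs k 0 := by
  have hi' : i.toNat < xs.length := by omega
  have hj' : j.toNat < xs.length := by omega
  have hk' : k.toNat < xs.length := by omega
  show PySem.List.pyGetD (PySem.List.pySetD (PySem.List.pySetD xs i (PySem.List.pyGetD xs j 0)) j (PySem.List.pyGetD xs i 0)) k 0 = _
  rw [PySem.List.pySetD_of_nonneg _ _ hi0, PySem.List.pySetD_of_nonneg _ _ hj0,
      PySem.List.pyGetD_eq_getElem _ _ hk0 (by simpa using hk),
      PySem.List.pyGetD_eq_getElem _ _ hi0 hi, PySem.List.pyGetD_eq_getElem _ _ hj0 hj,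
      PySem.List.pyGetD_eq_getElem _ _ hk0 hk]
  rw [List.getElem_set, List.getElem_set]
  split_ifs <;> simp_all <;> omega

theorem swap_perm_nat_lt (i : Nat) : ∀ (j : Nat) (xs : List Int) (hij : i < j) (hj : j < xs.length),
    ((xs.set i (xs[j]'hj)).set j (xs[i]'(Nat.lt_trans hij hj))).Perm xs := by
  induction i with
  | zero =>
    intro j xs hij hj
    match xs, j with
    | x :: t, k + 1 =>
      have hk : k < t.length := by simpa using hj
      simp only [List.set_cons_zero, List.set_cons_succ, List.getElem_cons_succ,
        List.getElem_cons_zero]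
      have p1 : (t[k] :: t.set k x).Perm (t[k] :: (x :: t.eraseIdx k)) :=
        List.Perm.cons _ (List.set_perm_cons_eraseIdx hk x)
      have p2 : (t[k] :: (x :: t.eraseIdx k)).Perm (x :: t[k] :: t.eraseIdx k) :=
        List.Perm.swap _ _ _
      have p3 : (x :: t[k] :: t.eraseIdx k).Perm (x :: t) :=
        List.Perm.cons _ (List.getElem_cons_eraseIdx_perm hk)
      exact (p1.trans p2).trans p3
  | succ i ih =>
    intro j xs hij hj
    match xs, j with
    | x :: t, k + 1 =>
      simp only [List.set_cons_succ, List.getElem_cons_succ]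
      exact List.Perm.cons _ (ih k t (by omega) (by simpa using hj))

theorem swap_perm_nat (i j : Nat) (xs : List Int) (hi : i < xs.length) (hj : j < xs.length) :
    ((xs.set i (xs[j]'hj)).set j (xs[i]'hi)).Perm xs := by
  rcases lt_trichotomy i j with h | h | h
  · exact swap_perm_nat_lt i j xs h hj
  · subst h
    rw [List.set_set, List.set_getElem_self hi]
  · have := swap_perm_nat_lt j i xs h hi
    rw [List.set_comm _ _ (by omega : i ≠ j)]
    exact this

theorem perm_pySwap (xs : List Int) (i j : Int)
    (hi0 : 0 ≤ i) (hi : i < (xs.length : Int)) (hj0 : 0 ≤ j) (hj : j < (xs.length : Int)) :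
    (pySwap xs i j).Perm xs := by
  have hi' : i.toNat < xs.length := by omega
  have hj' : j.toNat < xs.length := by omega
  show (PySem.List.pySetD (PySem.List.pySetD xs i (PySem.List.pyGetD xs j 0)) j (PySem.List.pyGetD xs i 0)).Perm xs
  rw [PySem.List.pySetD_of_nonneg _ _ hi0, PySem.List.pySetD_of_nonneg _ _ hj0,
      PySem.List.pyGetD_eq_getElem _ _ hi0 hi, PySem.List.pyGetD_eq_getElem _ _ hj0 hj]
  exact swap_perm_nat i.toNat j.toNat xs hi' hj'

theorem take_pySwap (xs : List Int) (i j : Int) (m : Nat)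
    (hi0 : 0 ≤ i) (hj0 : 0 ≤ j) (hmi : (m : Int) ≤ i) (hmj : (m : Int) ≤ j) :
    (pySwap xs i j).take m = xs.take m := by
  show (PySem.List.pySetD (PySem.List.pySetD xs i (PySem.List.pyGetD xs j 0)) j (PySem.List.pyGetD xs i 0)).take m = xs.take m
  rw [PySem.List.pySetD_of_nonneg _ _ hi0, PySem.List.pySetD_of_nonneg _ _ hj0,
      List.take_set_of_le (show m ≤ j.toNat by omega), List.take_set_of_le (show m ≤ i.toNat by omega)]

theorem drop_pySwap (xs : List Int) (i j : Int) (m : Nat)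
    (hi0 : 0 ≤ i) (hj0 : 0 ≤ j) (hmi : i < (m : Int)) (hmj : j < (m : Int)) :
    (pySwap xs i j).drop m = xs.drop m := by
  show (PySem.List.pySetD (PySem.List.pySetD xs i (PySem.List.pyGetD xs j 0)) j (PySem.List.pyGetD xs i 0)).drop m = xs.drop m
  rw [PySem.List.pySetD_of_nonneg _ _ hi0, PySem.List.pySetD_of_nonneg _ _ hj0,
      List.drop_set_of_lt (show j.toNat < m by omega), List.drop_set_of_lt (show i.toNat < m by omega)]

theorem slice_perm_of (xs ys : List Int) (a b : Nat)
    (hperm : ys.Perm xs) (ht : ys.take a = xs.take a) (hd : ys.drop b = xs.drop b) :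
    ((ys.drop a).take (b - a)).Perm ((xs.drop a).take (b - a)) := by
  by_cases hab : b ≤ a
  · have : b - a = 0 := by omega
    simp [this]
  · have hy : ys = ys.take a ++ ((ys.drop a).take (b - a) ++ ys.drop b) := by
      rw [← List.append_assoc, ← List.take_add, Nat.add_sub_cancel' (by omega),
        List.take_append_drop]
    have hx : xs = xs.take a ++ ((xs.drop a).take (b - a) ++ xs.drop b) := by
      rw [← List.append_assoc, ← List.take_add, Nat.add_sub_cancel' (by omega),
        List.take_append_drop]
    have hP : (ys.take a ++ ((ys.drop a).take (b - a) ++ ys.drop b)).Perm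
        (xs.take a ++ ((xs.drop a).take (b - a) ++ xs.drop b)) := by
      rw [← hy, ← hx]; exact hperm
    rw [ht, hd] at hP
    have := (List.perm_append_left_iff _).mp hP
    exact (List.perm_append_right_iff _).mp this

-- ---- the partition2 loop invariant ----

theorem ploop_inv (low height : Int) (len : Nat) (h2 : height < (len : Int)) (h0 : 0 ≤ low) :
    ∀ (n : Nat) (a : Int) (xs : List Int) (b : Int), (height - a).toNat = n →
    xs.length = len → low ≤ a → a ≤ height → low ≤ b → b ≤ a →
    (∀ k : Int, low ≤ k → k < b → PySem.List.pyGetD xs k 0 < PySem.List.pyGetD xs height 0) →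
    (∀ k : Int, b ≤ k → k < a → PySem.List.pyGetD xs height 0 ≤ PySem.List.pyGetD xs k 0) →
    ∃ ys c, (PySem.List.pyRange a height 1).foldl (pstep height) (xs, b) = (ys, c) ∧
      ys.length = len ∧ low ≤ c ∧ c ≤ height ∧
      ys.Perm xs ∧ ys.take low.toNat = xs.take low.toNat ∧
      ys.drop height.toNat = xs.drop height.toNat ∧
      (∀ k : Int, low ≤ k → k < c → PySem.List.pyGetD ys k 0 < PySem.List.pyGetD ys height 0) ∧
      (∀ k : Int, c ≤ k → k < height → PySem.List.pyGetD ys height 0 ≤ PySem.List.pyGetD ys k 0) := by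
  intro n
  induction n with
  | zero =>
    intro a xs b hn hlen hla hah hlb hba hc1 hc2
    have hae : a = height := by omega
    subst hae
    rw [PySem.List.pyRange_one_eq_nil (by omega), List.foldl_nil]
    exact ⟨xs, b, rfl, hlen, hlb, by omega, List.Perm.refl xs, rfl, rfl, hc1, hc2⟩
  | succ n ih =>
    intro a xs b hn hlen hla hah hlb hba hc1 hc2
    by_cases hlt : a < height
    case neg =>
      have hae : a = height := by omega
      subst hae
      rw [PySem.List.pyRange_one_eq_nil (by omega), List.foldl_nil]
      exact ⟨xs, b, rfl, hlen, hlb, by omega, List.Perm.refl xs, rfl, rfl, hc1, hc2⟩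
    case pos =>
      have hh0 : (0 : Int) ≤ height := by omega
      have hhN : (height.toNat : Int) = height := by omega
      rw [PySem.List.pyRange_one_cons hlt, List.foldl_cons]
      have hstep : pstep height (xs, b) a =
          if PySem.List.pyGetD xs a 0 < PySem.List.pyGetD xs height 0 then
            (pySwap xs a b, b + 1) else (xs, b) := rfl
      rw [hstep]
      have ha0 : (0 : Int) ≤ a := by omega
      have hb0 : (0 : Int) ≤ b := by omega
      have haL : a < (xs.length : Int) := by omega
      have hbL : b < (xs.length : Int) := by omega
      have hhL : height < (xs.length : Int) := by omega
      split_ifs with hc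
      · -- swap xs[a] and xs[b], boundary grows
        have hgswap : ∀ k : Int, 0 ≤ k → k < (xs.length : Int) →
            PySem.List.pyGetD (pySwap xs a b) k 0 =
              if k = b then PySem.List.pyGetD xs a 0
              else if k = a then PySem.List.pyGetD xs b 0
              else PySem.List.pyGetD xs k 0 := fun k hk0 hk =>
          get_pySwap xs a b k ha0 haL hb0 hbL hk0 hk
        have hgh : PySem.List.pyGetD (pySwap xs a b) height 0 = PySem.List.pyGetD xs height 0 := by
          rw [hgswap height hh0 hhL, if_neg (by omega), if_neg (by omega)]
        obtain ⟨ys, c, hfold, l1, l2, l3, l4, l5, l6, l7, l8⟩ :=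
          ih (a + 1) (pySwap xs a b) (b + 1) (by omega) (by rw [length_pySwap]; exact hlen)
            (by omega) (by omega) (by omega) (by omega)
            (by -- all of [low, b+1) still < pivot
              intro k hk0 hk1
              rw [hgh, hgswap k (by omega) (by omega)]
              split_ifs with e1 e2
              · exact hc
              · omega
              · exact hc1 k hk0 (by omega))
            (by -- all of [b+1, a+1) still ≥ pivot
              intro k hk0 hk1
              rw [hgh, hgswap k (by omega) (by omega)]
              split_ifs with e1 e2
              · omega
              · subst e2
                exact hc2 b (by omega) (by omega)
              · exact hc2 k (by omega) (by omega))
        refine ⟨ys, c, hfold, l1, by omega, l3, l4.trans (perm_pySwap xs a b ha0 haL hb0 hbL),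
          l5.trans (take_pySwap xs a b low.toNat ha0 hb0 (by omega) (by omega)),
          l6.trans (drop_pySwap xs a b height.toNat ha0 hb0 (by omega) (by omega)), l7, l8⟩
      · obtain ⟨ys, c, hfold, l1, l2, l3, l4, l5, l6, l7, l8⟩ :=
          ih (a + 1) xs b (by omega) hlen (by omega) (by omega) (by omega) (by omega) hc1
            (by intro k hk0 hk1
                by_cases hka : k = a
                · subst hka; omega
                · exact hc2 k hk0 (by omega))
        exact ⟨ys, c, hfold, l1, l2, l3, l4, l5, l6, l7, l8⟩

-- ---- full behaviour of partition2 on a valid window ----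

theorem partition2_eq (nums : List Int) (low height : Int) :
    partition2 nums low height =
      (pySwap ((PySem.List.pyRange low height 1).foldl (pstep height)
          (pySwap nums (PySem.Int.floordiv (low + height) 2) height, low)).1 height
        ((PySem.List.pyRange low height 1).foldl (pstep height)
          (pySwap nums (PySem.Int.floordiv (low + height) 2) height, low)).2,
       ((PySem.List.pyRange low height 1).foldl (pstep height)
          (pySwap nums (PySem.Int.floordiv (low + height) 2) height, low)).2) := rfl

theorem partition2_spec (nums : List Int) (low height : Int)
    (h0 : 0 ≤ low) (h1 : low ≤ height) (h2 : height < (nums.length : Int)) :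
    (partition2 nums low height).1.length = nums.length ∧
    low ≤ (partition2 nums low height).2 ∧ (partition2 nums low height).2 ≤ height ∧
    (partition2 nums low height).1.Perm nums ∧
    (partition2 nums low height).1.take low.toNat = nums.take low.toNat ∧
    (partition2 nums low height).1.drop (height.toNat + 1) = nums.drop (height.toNat + 1) ∧
    (∀ k : Int, low ≤ k → k < (partition2 nums low height).2 →
      PySem.List.pyGetD (partition2 nums low height).1 k 0 <
        PySem.List.pyGetD (partition2 nums low height).1 (partition2 nums low height).2 0) ∧
    (∀ k : Int, (partition2 nums low height).2 < k → k ≤ height →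
      PySem.List.pyGetD (partition2 nums low height).1 (partition2 nums low height).2 0 ≤
        PySem.List.pyGetD (partition2 nums low height).1 k 0) := by
  have hmid := PySem.Int.floordiv_two_mid_bounds h1
  have hm0 : (0 : Int) ≤ PySem.Int.floordiv (low + height) 2 := by omega
  have hh0 : (0 : Int) ≤ height := by omega
  have hmL : PySem.Int.floordiv (low + height) 2 < (nums.length : Int) := by omega
  have hlen1 : (pySwap nums (PySem.Int.floordiv (low + height) 2) height).length = nums.length :=
    length_pySwap ..
  obtain ⟨ys, c, hfold, l1, l2, l3, l4, l5, l6, l7, l8⟩ :=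
    ploop_inv low height nums.length h2 h0 (height - low).toNat low
      (pySwap nums (PySem.Int.floordiv (low + height) 2) height) low rfl hlen1
      (le_refl low) h1 (le_refl low) (le_refl low)
      (by intro k hk0 hk1; omega) (by intro k hk0 hk1; omega)
  rw [partition2_eq, hfold]
  simp only []
  have hc0 : (0 : Int) ≤ c := by omega
  have hcL : c < (ys.length : Int) := by omega
  have hhL : height < (ys.length : Int) := by omega
  have hgswap : ∀ k : Int, 0 ≤ k → k < (ys.length : Int) →
      PySem.List.pyGetD (pySwap ys height c) k 0 =
        if k = c then PySem.List.pyGetD ys height 0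
        else if k = height then PySem.List.pyGetD ys c 0
        else PySem.List.pyGetD ys k 0 := fun k hk0 hk =>
    get_pySwap ys height c k hh0 hhL hc0 hcL hk0 hk
  refine ⟨by rw [length_pySwap]; exact l1, l2, l3, ?_, ?_, ?_, ?_, ?_⟩
  · -- permutation
    have p1 : (pySwap ys height c).Perm ys := perm_pySwap ys height c hh0 hhL hc0 hcL
    have p2 : (pySwap nums (PySem.Int.floordiv (low + height) 2) height).Perm nums :=
      perm_pySwap nums _ height hm0 hmL hh0 h2
    exact (p1.trans l4).trans p2
  · -- prefix below low untouched
    have t1 : (pySwap ys height c).take low.toNat = ys.take low.toNat :=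
      take_pySwap ys height c low.toNat hh0 hc0 (by omega) (by omega)
    have t2 : (pySwap nums (PySem.Int.floordiv (low + height) 2) height).take low.toNat =
        nums.take low.toNat :=
      take_pySwap nums _ height low.toNat hm0 hh0 (by omega) (by omega)
    rw [t1, l5, t2]
  · -- suffix above height untouched
    have d1 : (pySwap ys height c).drop (height.toNat + 1) = ys.drop (height.toNat + 1) :=
      drop_pySwap ys height c (height.toNat + 1) hh0 hc0 (by omega) (by omega)
    have d2 : (pySwap nums (PySem.Int.floordiv (low + height) 2) height).drop (height.toNat + 1) =
        nums.drop (height.toNat + 1) :=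
      drop_pySwap nums _ height (height.toNat + 1) hm0 hh0 (by omega) (by omega)
    have l6' : ys.drop (height.toNat + 1) =
        (pySwap nums (PySem.Int.floordiv (low + height) 2) height).drop (height.toNat + 1) := by
      have := congrArg (List.drop 1) l6
      simpa [List.drop_drop, Nat.add_comm] using this
    rw [d1, l6', d2]
  · -- everything left of the pivot is smaller
    intro k hk0 hk1
    rw [hgswap k (by omega) (by omega), if_neg (by omega), if_neg (by omega),
        hgswap c hc0 hcL, if_pos rfl]
    exact l7 k hk0 hk1
  · -- everything right of the pivot is at least the pivot
    intro k hk1 hk2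
    rw [hgswap c hc0 hcL, if_pos rfl]
    by_cases hkh : k = height
    · by_cases hch : c = height
      · omega
      · rw [hkh, hgswap height hh0 hhL, if_neg (by omega), if_pos rfl]
        exact l8 c (le_refl c) (by omega)
    · rw [hgswap k (by omega) (by omega), if_neg (by omega), if_neg hkh]
      exact l8 k (by omega) (by omega)

-- ---- sorted-window facts ----

theorem sorted_decomp (l r : List Int) (v : Int)
    (hl : ∀ x ∈ l, x < v) (hr : ∀ x ∈ r, v ≤ x) :
    PySem.List.sorted (l ++ v :: r) (fun x => x) false =
      PySem.List.sorted l (fun x => x) false ++ v :: PySem.List.sorted r (fun x => x) false := by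
  refine PySem.List.sorted_id_eq_of_perm_of_pairwise _ _ ?_ ?_
  · exact (PySem.List.sorted_perm l _ false).append
      (List.Perm.cons v (PySem.List.sorted_perm r _ false))
  · rw [List.pairwise_append]
    refine ⟨PySem.List.sorted_pairwise l _, ?_, ?_⟩
    · rw [List.pairwise_cons]
      refine ⟨fun y hy => hr y ((PySem.List.mem_sorted r _ false y).mp hy), ?_⟩
      exact PySem.List.sorted_pairwise r _
    · intro x hx y hy
      have hxv : x < v := hl x ((PySem.List.mem_sorted l _ false x).mp hx)
      rcases List.mem_cons.mp hy with rfl | hy'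
      · omega
      · have := hr y ((PySem.List.mem_sorted r _ false y).mp hy')
        omega

theorem window_decomp (ns : List Int) (low p height : Int)
    (h0 : 0 ≤ low) (hlp : low ≤ p) (hph : p ≤ height) (hh : height < (ns.length : Int)) :
    (ns.drop low.toNat).take ((height + 1).toNat - low.toNat) =
      (ns.drop low.toNat).take (p.toNat - low.toNat) ++
        PySem.List.pyGetD ns p 0 ::
          (ns.drop (p.toNat + 1)).take ((height + 1).toNat - (p.toNat + 1)) := by
  have hpL : p.toNat < ns.length := by omega
  have e1 : (height + 1).toNat - low.toNat =
      (p.toNat - low.toNat) + ((height + 1).toNat - p.toNat) := by omega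
  rw [e1, List.take_add, List.drop_drop]
  congr 1
  have e2 : low.toNat + (p.toNat - low.toNat) = p.toNat := by omega
  rw [e2]
  have e3 : ns.drop p.toNat = ns[p.toNat] :: ns.drop (p.toNat + 1) :=
    List.drop_eq_getElem_cons hpL
  rw [e3]
  have e4 : (height + 1).toNat - p.toNat = ((height + 1).toNat - (p.toNat + 1)) + 1 := by omega
  rw [e4, List.take_succ_cons]
  congr 1
  exact (PySem.List.pyGetD_eq_getElem ns 0 (by omega) (by omega)).symm

-- ---- the main induction: A equals B on every valid nonempty window ----

theorem median_helper_unfold (nums : List Int) (low mid height : Int) (h : low ≤ height) :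
    median_helper nums low mid height =
      (if (partition2 nums low height).2 = mid then
        PySem.List.pyGet? (partition2 nums low height).1 mid
      else if (partition2 nums low height).2 < mid then
        median_helper (partition2 nums low height).1 ((partition2 nums low height).2 + 1) mid height
      else
        median_helper (partition2 nums low height).1 low mid ((partition2 nums low height).2 - 1)) := by
  rw [median_helper]
  rw [dif_pos h]

theorem median_helper_none (nums : List Int) (low mid height : Int) (h : ¬ low ≤ height) :
    median_helper nums low mid height = none := by
  rw [median_helper]
  rw [dif_neg h]

theorem alt_eq (ms : List Int) (a m h : Int) (ha : 0 ≤ a) (hh : 0 ≤ h + 1) :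
    median_helper_alt ms a m h =
      if a ≤ m ∧ m ≤ h then
        PySem.List.pyGet?
          (PySem.List.sorted ((ms.drop a.toNat).take ((h + 1).toNat - a.toNat)) (fun x => x) false)
          (m - a)
      else none := by
  unfold median_helper_alt
  rw [PySem.List.slice_toNat ms ha hh]

theorem window_mem (ns : List Int) (aN cN : Nat) (x : Int) (hc : cN ≤ ns.length)
    (hx : x ∈ (ns.drop aN).take (cN - aN)) :
    ∃ k : Nat, aN ≤ k ∧ k < cN ∧ ns[k]? = some x := by
  obtain ⟨i, hi, hEq⟩ := List.mem_iff_getElem.mp hx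
  have hi' : i < cN - aN := by
    simp [List.length_take, List.length_drop] at hi
    omega
  have hiL : aN + i < ns.length := by omega
  refine ⟨aN + i, by omega, by omega, ?_⟩
  rw [List.getElem?_eq_getElem hiL]
  have : (List.take (cN - aN) (List.drop aN ns))[i]'hi = ns[aN + i]'hiL := by
    rw [List.getElem_take, List.getElem_drop]
  rw [← hEq, this]

theorem A_eq_B_on_window : ∀ (n : Nat) (nums : List Int) (low mid height : Int),
    (height - low).toNat < n → 0 ≤ low → low ≤ height → height < (nums.length : Int) →
    median_helper nums low mid height = median_helper_alt nums low mid height := by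
  intro n
  induction n with
  | zero => intro nums low mid height hn _ _ _; omega
  | succ n ih =>
    intro nums low mid height hn h0 h1 h2
    obtain ⟨hlen, hpl, hph, hperm, htake, hdrop, hlt, hge⟩ :=
      partition2_spec nums low height h0 h1 h2
    rw [median_helper_unfold nums low mid height h1]
    set ns := (partition2 nums low height).1 with hns
    set p := (partition2 nums low height).2 with hp
    have hnsL : (ns.length : Int) = (nums.length : Int) := by rw [hlen]
    have hlowN : (low.toNat : Int) = low := by omega
    have hpN : (p.toNat : Int) = p := by omega
    have hhN : ((height + 1).toNat : Int) = height + 1 := by omega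
    -- the sorted window of nums decomposes around the pivot value
    have hdrop' : ns.drop ((height + 1).toNat) = nums.drop ((height + 1).toNat) := by
      rw [show (height + 1).toNat = height.toNat + 1 from by omega]
      exact hdrop
    have hWperm : ((ns.drop low.toNat).take ((height + 1).toNat - low.toNat)).Perm
        ((nums.drop low.toNat).take ((height + 1).toNat - low.toNat)) :=
      slice_perm_of nums ns low.toNat ((height + 1).toNat) hperm htake hdrop'
    have hvd := window_decomp ns low p height h0 hpl hph (by omega)
    have hsorted_full :
        PySem.List.sorted ((nums.drop low.toNat).take ((height + 1).toNat - low.toNat))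
            (fun x => x) false =
          PySem.List.sorted ((ns.drop low.toNat).take (p.toNat - low.toNat)) (fun x => x) false ++
            PySem.List.pyGetD ns p 0 ::
              PySem.List.sorted
                ((ns.drop (p.toNat + 1)).take ((height + 1).toNat - (p.toNat + 1)))
                (fun x => x) false := by
      rw [PySem.List.sorted_eq_sorted_of_perm _ _ (fun x => x) (fun a b hab => hab) hWperm.symm, hvd]
      refine sorted_decomp _ _ _ ?_ ?_
      · intro x hx
        obtain ⟨k, hk1, hk2, hk3⟩ := window_mem ns low.toNat p.toNat x (by omega) hx
        rw [List.getElem?_eq_getElem (by omega : k < ns.length)] at hk3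
        have : PySem.List.pyGetD ns (k : Int) 0 = x := by
          rw [PySem.List.pyGetD_eq_getElem ns 0 (by omega) (by omega)]
          simpa using Option.some_inj.mp hk3
        rw [← this]
        exact hlt (k : Int) (by omega) (by omega)
      · intro x hx
        obtain ⟨k, hk1, hk2, hk3⟩ := window_mem ns (p.toNat + 1) ((height + 1).toNat) x
          (by omega) hx
        rw [List.getElem?_eq_getElem (by omega : k < ns.length)] at hk3
        have : PySem.List.pyGetD ns (k : Int) 0 = x := by
          rw [PySem.List.pyGetD_eq_getElem ns 0 (by omega) (by omega)]
          simpa using Option.some_inj.mp hk3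
        rw [← this]
        exact hge (k : Int) (by omega) (by omega)
    have hlenL :
        (PySem.List.sorted ((ns.drop low.toNat).take (p.toNat - low.toNat))
          (fun x => x) false).length = p.toNat - low.toNat := by
      rw [PySem.List.length_sorted]
      simp [List.length_take, List.length_drop]
      omega
    by_cases hmid : p = mid
    · -- pivot landed on mid: A returns ns[mid]
      rw [if_pos hmid, ← hmid]
      rw [alt_eq nums low p height h0 (by omega), if_pos ⟨hpl, hph⟩]
      rw [hsorted_full]
      rw [PySem.List.pyGet?_of_nonneg _ (by omega : (0 : Int) ≤ p),
          PySem.List.pyGet?_of_nonneg _ (by omega : (0 : Int) ≤ p - low)]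
      rw [List.getElem?_append_right (by rw [hlenL]; omega), hlenL]
      rw [show (p - low).toNat - (p.toNat - low.toNat) = 0 from by omega]
      rw [List.getElem?_eq_getElem (by omega : p.toNat < ns.length)]
      simp only [List.getElem?_cons_zero]
      rw [PySem.List.pyGetD_eq_getElem ns 0 (by omega) (by omega)]
    · rw [if_neg hmid]
      by_cases hplt : p < mid
      · rw [if_pos hplt]
        by_cases hpe : height < p + 1
        · rw [median_helper_none ns (p + 1) mid height (by omega)]
          rw [alt_eq nums low mid height h0 (by omega), if_neg (by omega)]
        · rw [ih ns (p + 1) mid height (by omega) (by omega) (by omega) (by omega)]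
          rw [alt_eq ns (p + 1) mid height (by omega) (by omega),
              alt_eq nums low mid height h0 (by omega)]
          by_cases hmh : mid ≤ height
          · rw [if_pos ⟨by omega, hmh⟩, if_pos ⟨by omega, hmh⟩]
            rw [show (p + 1).toNat = p.toNat + 1 from by omega]
            rw [hsorted_full]
            rw [PySem.List.pyGet?_of_nonneg _ (by omega : (0 : Int) ≤ mid - (p + 1)),
                PySem.List.pyGet?_of_nonneg _ (by omega : (0 : Int) ≤ mid - low)]
            rw [List.getElem?_append_right (by rw [hlenL]; omega), hlenL]
            rw [show (mid - low).toNat - (p.toNat - low.toNat) = (mid - (p + 1)).toNat + 1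
              from by omega]
            rw [List.getElem?_cons_succ]
          · rw [if_neg (by omega), if_neg (by omega)]
      · rw [if_neg hplt]
        by_cases hpe : p - 1 < low
        · rw [median_helper_none ns low mid (p - 1) (by omega)]
          rw [alt_eq nums low mid height h0 (by omega), if_neg (by omega)]
        · rw [ih ns low mid (p - 1) (by omega) h0 (by omega) (by omega)]
          rw [alt_eq ns low mid (p - 1) h0 (by omega),
              alt_eq nums low mid height h0 (by omega)]
          by_cases hlm : low ≤ mid
          · rw [if_pos ⟨hlm, by omega⟩, if_pos ⟨hlm, by omega⟩]
            rw [show p - 1 + 1 = p from by omega]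
            rw [hsorted_full]
            rw [PySem.List.pyGet?_of_nonneg _ (by omega : (0 : Int) ≤ mid - low),
                PySem.List.pyGet?_of_nonneg _ (by omega : (0 : Int) ≤ mid - low)]
            rw [List.getElem?_append_left (by rw [hlenL]; omega)]
          · rw [if_neg (by omega), if_neg (by omega)]

-- ===== VERDICT (by name: the statement is the Claim_ definition above) =====
theorem median_helper_spec : Claim_equal_median_helper := by
  intro nums low mid height _hdom hpre
  unfold Spec_median_helper
  rcases hpre with h | ⟨h0, h1, h2⟩
  · rw [median_helper, median_helper_alt]
    have : ¬ low ≤ height := by omega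
    simp [this]
    omega
  · exact A_eq_B_on_window ((height - low).toNat + 1) nums low mid height (by omega) h0 h1 h2
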